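-- pv_equiv track=rewrite | github.com/Enjef/Algo | 2300 - 2399/2391 - Minimum Amount of Time to Collect Garbage/2391 - Minimum Amount of Time to Collect Garbage.py | garbageCollection_best_speed
-- ===== SOURCE A (Python) =====
-- from typing import List
--
-- def garbageCollection_best_speed(garbage: List[str], travel: List[int]) -> int:
--     last = dict()
--     res = 0
--     count = 0
--     for i in range(len(garbage)-1, -1, -1):
--         if count < 3:
--             for c in garbage[i]:
--                 if c not in last:
--                     last[c] = i
--                     count += 1
--         res += len(garbage[i])
--     s = 0
--     j = 0
--     for index in sorted(last.values()):
--         while j < index: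
--             s += travel[j]
--             j += 1
--         res += s
--     return res
-- ===== SOURCE B (Python) =====
-- from typing import List
--
-- def garbageCollection_best_speed(garbage: List[str], travel: List[int]) -> int:
--     # Count each road once: road j-1 is traversed by one truck per distinct
--     # garbage type present at house j or beyond.  No truck drives past the
--     # last house that has any garbage, so trailing empty houses are skipped.
--     res = sum(map(len, garbage))
--     seen = set()
--     for j in range(len(garbage) - 1, 0, -1):
--         if garbage[j] or seen:
--             seen.update(garbage[j])
--             res += travel[j - 1] * len(seen)
--     return res
-- ===== Notes on version B (the rewrite author's own statement) =====
-- stated objective: alternative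
-- what changed: A does per-type bookkeeping (reverse scan recording each type's last house with an early stop after 3 types, then a sorted merge sweep adding a prefix travel sum per type); B does per-road counting: one backward pass with a growing 'seen' set that charges each road once, multiplied by the number of distinct garbage types at or beyond it. …
-- outside the precondition, e.g. on garbageCollection_best_speed(['', 'A', 'BCD'], [5, 7]): A returns 40, B returns 45
import Mathlib
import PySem

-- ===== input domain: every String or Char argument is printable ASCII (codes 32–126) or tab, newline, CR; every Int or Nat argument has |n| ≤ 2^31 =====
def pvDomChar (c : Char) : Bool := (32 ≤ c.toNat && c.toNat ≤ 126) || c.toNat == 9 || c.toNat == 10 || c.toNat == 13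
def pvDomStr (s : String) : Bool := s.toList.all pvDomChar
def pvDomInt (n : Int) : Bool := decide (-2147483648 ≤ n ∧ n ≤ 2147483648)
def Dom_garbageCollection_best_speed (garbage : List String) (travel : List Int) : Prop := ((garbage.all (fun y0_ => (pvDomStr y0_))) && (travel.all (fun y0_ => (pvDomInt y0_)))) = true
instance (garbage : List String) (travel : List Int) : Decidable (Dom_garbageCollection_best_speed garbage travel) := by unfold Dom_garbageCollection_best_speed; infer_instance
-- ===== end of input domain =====

-- B replaces A's per-type bookkeeping (reverse early-stop last-index scan + sorted merge sweep of
-- per-type prefix sums) by per-road counting: one backward pass that charges each road once,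
-- multiplied by the number of distinct garbage types at or beyond it (objective: alternative; no
-- speed claim).

-- ===== PORT A =====
-- exact port of A's inner `while j < index: s += travel[j]; j += 1` loop; an out-of-range travel[j]
-- (IndexError in Python) is excluded by Pre_, the port reads a default 0 there.
def pvSweep (travel : List Int) (index : Int) (j : Int) (s : Int) : Int × Int :=
  if _h : j < index then
    pvSweep travel index (j + 1) (s + PySem.List.pyGetD travel j 0)
  else (s, j)
termination_by (index - j).toNat
decreasing_by omega

def garbageCollection_best_speed (garbage : List String) (travel : List Int) : Int :=
  let st :=
    (PySem.List.pyRange ((garbage.length : Int) - 1) (-1) (-1)).foldl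
      (fun (st : (PySem.Dict Char Int × Int) × Int) i =>
        let g := PySem.List.pyGetD garbage i ""
        let lc :=
          if st.1.2 < 3 then
            g.toList.foldl
              (fun (q : PySem.Dict Char Int × Int) c =>
                if !(q.1.contains c) then (q.1.insert c i, q.2 + 1) else q)
              st.1
          else st.1
        (lc, st.2 + PySem.Str.len g))
      ((PySem.Dict.empty, 0), 0)
  let fin :=
    (PySem.List.sorted st.1.1.values (fun v => v)).foldl
      (fun (q : Int × Int × Int) index =>
        let sj := pvSweep travel index q.2.2 q.2.1
        (q.1 + sj.1, sj.1, sj.2))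
      (st.2, 0, 0)
  fin.1

-- ===== PORT B =====
-- an out-of-range travel[j-1] (IndexError in Python) is excluded by Pre_, the port reads 0 there.
def garbageCollection_best_speed_alt (garbage : List String) (travel : List Int) : Int :=
  let res := garbage.foldl (fun r g => r + PySem.Str.len g) 0
  let st :=
    (PySem.List.pyRange ((garbage.length : Int) - 1) 0 (-1)).foldl
      (fun (p : Int × PySem.Set Char) j =>
        let g := PySem.List.pyGetD garbage j ""
        if g.toList ≠ [] ∨ p.2 ≠ [] then
          let seen := PySem.Set.update p.2 g.toList
          (p.1 + PySem.List.pyGetD travel (j - 1) 0 * PySem.Set.len seen, seen)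
        else p)
      (res, (PySem.Set.empty : PySem.Set Char))
  st.1

-- ===== PRECONDITION & SPEC =====
-- Pre_ keeps the problem's domain: garbage uses only the three garbage types 'M','P','G', or more
-- generally the strings after the first use at most 3 distinct characters (then A's `count < 3`
-- early stop drops at worst characters whose last house is index 0, which cost 0 travel; with a
-- 4th distinct character beyond the first house A's early stop and B's full suffix count are two
-- defensible readings of an unspecified input) — and travel must reach every nonempty house index
-- (otherwise A raises IndexError on travel[j], and B on travel[j-1]).
def Pre_garbageCollection_best_speed (garbage : List String) (travel : List Int) : Prop :=
  ((garbage.all (fun s => s.toList.all (fun c => c == 'M' || c == 'P' || c == 'G')) = true) ∨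
   ((garbage.drop 1).flatMap (fun s => s.toList)).dedup.length ≤ 3) ∧
  (∀ p ∈ PySem.List.enumerate garbage, p.2.toList ≠ [] → p.1 ≤ (travel.length : Int))
instance (garbage : List String) (travel : List Int) : Decidable (Pre_garbageCollection_best_speed garbage travel) := by
  unfold Pre_garbageCollection_best_speed; infer_instance

def pvWitness_garbageCollection_best_speed : List String × List Int := (["MP", "G", "PG"], [3, 4])

def Spec_garbageCollection_best_speed (garbage : List String) (travel : List Int) (out : Int) : Prop := out = garbageCollection_best_speed_alt garbage travel
instance (garbage : List String) (travel : List Int) (out : Int) : Decidable (Spec_garbageCollection_best_speed garbage travel out) := by unfold Spec_garbageCollection_best_speed; infer_instance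

-- ===== CLAIM (what is proved, stated in full; the proofs are below) =====
def Claim_equal_garbageCollection_best_speed : Prop := ∀ (garbage : List String) (travel : List Int), Dom_garbageCollection_best_speed garbage travel → Pre_garbageCollection_best_speed garbage travel → Spec_garbageCollection_best_speed garbage travel (garbageCollection_best_speed garbage travel)

-- ===== LEMMAS AND PROOFS =====

-- prefix sum of travel up to (Int) index v
def pvPfx (travel : List Int) (v : Int) : Int := (travel.take v.toNat).sum

-- first-wins scan of (index, string) pairs for the char c (what A's reverse loop computes)
def pvFirst (c : Char) (l : List (Int × String)) : Option Int :=
  (l.find? (fun p => decide (c ∈ p.2.toList))).map Prod.fst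

-- A's per-house dict/count step, on an (index, string) pair
def pvStepA (st : PySem.Dict Char Int × Int) (p : Int × String) : PySem.Dict Char Int × Int :=
  if st.2 < 3 then
    p.2.toList.foldl
      (fun (q : PySem.Dict Char Int × Int) c =>
        if !(q.1.contains c) then (q.1.insert c p.1, q.2 + 1) else q)
      st
  else st

-- B's per-road step (the loop body of B's port, as a named function)
def pvStepB (garbage : List String) (travel : List Int)
    (p : Int × PySem.Set Char) (j : Int) : Int × PySem.Set Char :=
  let g := PySem.List.pyGetD garbage j ""
  if g.toList ≠ [] ∨ p.2 ≠ [] then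
    let seen := PySem.Set.update p.2 g.toList
    (p.1 + PySem.List.pyGetD travel (j - 1) 0 * PySem.Set.len seen, seen)
  else p

-- the distinct characters at house j or beyond
def pvSuff (garbage : List String) (j : Nat) : List Char :=
  ((garbage.drop j).flatMap String.toList).dedup

-- the last house index (below n) whose string contains c, scanned from the top
def pvLF (garbage : List String) (c : Char) : Nat → Option Nat
  | 0 => none
  | n + 1 => if c ∈ (garbage.getD n "").toList then some n else pvLF garbage c n

-- the per-character contribution: prefix travel sum up to the last house containing c (0 if none)
def pvF (garbage : List String) (travel : List Int) (c : Char) : Int :=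
  pvPfx travel (((pvLF garbage c garbage.length).map (fun (v : Nat) => (v : Int))).getD 0)

-- a foldl whose pair state has independent components splits
theorem pv_foldl_split {σ τ γ : Type} (l : List γ) (f : σ → γ → σ) (g : τ → γ → τ)
    (a : σ) (b : τ) :
    l.foldl (fun p x => (f p.1 x, g p.2 x)) (a, b) = (l.foldl f a, l.foldl g b) := by
  induction l generalizing a b with
  | nil => rfl
  | cons x xs ih => simpa using ih (f a x) (g b x)

theorem pv_foldl_add {γ : Type} (l : List γ) (w : γ → Int) (b : Int) :
    l.foldl (fun r x => r + w x) b = b + (l.map w).sum := by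
  induction l generalizing b with
  | nil => simp
  | cons x xs ih => simp [ih, add_assoc]

-- the reversed enumerate list is A's countdown range, paired with the indexed strings
theorem pv_enum_rev (garbage : List String) :
    (PySem.List.enumerate garbage).reverse
      = (PySem.List.pyRange ((garbage.length : Int) - 1) (-1) (-1)).map
          (fun j => (j, PySem.List.pyGetD garbage j "")) := by
  rw [PySem.List.pyRange_neg_one_eq_reverse]
  rw [List.map_reverse]
  rw [PySem.List.enumerate_eq_map_pyRange garbage ""]
  norm_num [PySem.List.len_eq]

-- A's phase 1, as a pair fold over the reversed enumeration, split into dict and length parts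
theorem pvA_phase1 (garbage : List String) :
    (PySem.List.pyRange ((garbage.length : Int) - 1) (-1) (-1)).foldl
      (fun (st : (PySem.Dict Char Int × Int) × Int) i =>
        let g := PySem.List.pyGetD garbage i ""
        let lc :=
          if st.1.2 < 3 then
            g.toList.foldl
              (fun (q : PySem.Dict Char Int × Int) c =>
                if !(q.1.contains c) then (q.1.insert c i, q.2 + 1) else q)
              st.1
          else st.1
        (lc, st.2 + PySem.Str.len g))
      ((PySem.Dict.empty, 0), 0)
    = ((PySem.List.enumerate garbage).reverse.foldl pvStepA (PySem.Dict.empty, 0),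
       ((PySem.List.enumerate garbage).reverse.map (fun p => PySem.Str.len p.2)).sum) := by
  have h1 : (PySem.List.enumerate garbage).reverse.foldl
      (fun (st : (PySem.Dict Char Int × Int) × Int) p => (pvStepA st.1 p, st.2 + PySem.Str.len p.2))
      ((PySem.Dict.empty, 0), 0)
    = ((PySem.List.enumerate garbage).reverse.foldl pvStepA (PySem.Dict.empty, 0),
       ((PySem.List.enumerate garbage).reverse.map (fun p => PySem.Str.len p.2)).sum) := by
    rw [pv_foldl_split ((PySem.List.enumerate garbage).reverse) pvStepA
      (fun r (p : Int × String) => r + PySem.Str.len p.2) (PySem.Dict.empty, 0) 0]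
    rw [pv_foldl_add]
    simp
  rw [← h1, pv_enum_rev, List.foldl_map]
  rfl

-- inner insert loop of A: lookups, key set, nodup, count
theorem pvA_inner (cs : List Char) (d : PySem.Dict Char Int) (count i : Int)
    (hnd : d.keys.Nodup) (hc : count = d.keys.length) :
    (∀ x, ((cs.foldl (fun q c => if !(q.1.contains c) then (q.1.insert c i, q.2 + 1) else q) (d, count)).1.get? x)
        = (d.get? x).or (if x ∈ cs then some i else none)) ∧
    (∀ k, k ∈ (cs.foldl (fun q c => if !(q.1.contains c) then (q.1.insert c i, q.2 + 1) else q) (d, count)).1.keys ↔ k ∈ d.keys ∨ k ∈ cs) ∧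
    (cs.foldl (fun q c => if !(q.1.contains c) then (q.1.insert c i, q.2 + 1) else q) (d, count)).1.keys.Nodup ∧
    (cs.foldl (fun q c => if !(q.1.contains c) then (q.1.insert c i, q.2 + 1) else q) (d, count)).2
      = ((cs.foldl (fun q c => if !(q.1.contains c) then (q.1.insert c i, q.2 + 1) else q) (d, count)).1.keys.length : Int) := by
  induction cs generalizing d count with
  | nil => refine ⟨fun x => by simp, fun k => by simp, by simpa using hnd, by simp [hc]⟩
  | cons c cs ih =>
    by_cases hco : d.contains c = true
    · have hstep : (if !(d.contains c) then (d.insert c i, count + 1) else (d, count)) = (d, count) := by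
        simp [hco]
      obtain ⟨h1, h2, h3, h4⟩ := ih d count hnd hc
      simp only [List.foldl_cons, hstep]
      refine ⟨fun x => ?_, fun k => ?_, h3, h4⟩
      · rw [h1 x]
        by_cases hx : x = c
        · have : (d.get? x).isSome := by
            rw [PySem.Dict.contains_eq_isSome_get?] at hco; rw [hx]; exact hco
          rcases Option.isSome_iff_exists.mp this with ⟨v, hv⟩
          simp [hv]
        · simp [List.mem_cons, hx]
      · rw [h2 k]
        by_cases hk : k = c
        · have : c ∈ d.keys := (PySem.Dict.contains_iff_mem_keys d c).mp hco
          rw [hk]; simp [this]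
        · simp [hk]
    · have hco' : d.contains c = false := by simpa using hco
      have hstep : (if !(d.contains c) then (d.insert c i, count + 1) else (d, count)) = (d.insert c i, count + 1) := by
        simp [hco']
      have hndi : (d.insert c i).keys.Nodup := PySem.Dict.nodup_keys_insert d c i hnd
      have hki : (d.insert c i).keys = d.keys ++ [c] := PySem.Dict.keys_insert_of_not_contains d i hco'
      have hci : count + 1 = ((d.insert c i).keys.length : Int) := by
        rw [hki]; simp [hc]
      obtain ⟨h1, h2, h3, h4⟩ := ih (d.insert c i) (count + 1) hndi hci
      simp only [List.foldl_cons, hstep]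
      refine ⟨fun x => ?_, fun k => ?_, h3, h4⟩
      · rw [h1 x]
        by_cases hx : x = c
        · have hnone : d.get? c = none := by
            rw [PySem.Dict.get?_eq_none_iff_contains]; exact hco'
          rw [hx, PySem.Dict.get?_insert_self, hnone]
          simp
        · rw [PySem.Dict.get?_insert_of_ne d i hx]
          simp [List.mem_cons, hx]
      · rw [h2 k, hki]
        by_cases hk : k = c <;> simp [hk]

-- 3 distinct keys drawn from an alphabet of at most 3 characters exhaust the alphabet
theorem pv_all3 (ks AL : List Char) (hnd : ks.Nodup) (hsub : ∀ k ∈ ks, k ∈ AL)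
    (hAL : AL.length ≤ 3) (hlen : 3 ≤ (ks.length : Int)) : ∀ c ∈ AL, c ∈ ks := by
  intro c hc
  have hsub' : ks.toFinset ⊆ AL.toFinset :=
    fun k hk => List.mem_toFinset.mpr (hsub k (List.mem_toFinset.mp hk))
  have h1 : AL.toFinset.card ≤ ks.toFinset.card := by
    have h2 := List.toFinset_card_le AL
    rw [List.toFinset_card_of_nodup hnd]
    omega
  have heq := Finset.eq_of_subset_of_card_le hsub' h1
  exact List.mem_toFinset.mp (heq ▸ List.mem_toFinset.mpr hc)

theorem pv_first_cons (x : Char) (p : Int × String) (l : List (Int × String)) :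
    pvFirst x (p :: l) = if x ∈ p.2.toList then some p.1 else pvFirst x l := by
  by_cases h : x ∈ p.2.toList <;> simp [pvFirst, h]

-- invariant of A's reverse dict loop, over an alphabet AL of at most 3 characters
theorem pvA_inv (AL : List Char) (hALle : AL.length ≤ 3)
    (l : List (Int × String)) (d : PySem.Dict Char Int) (count : Int)
    (hMPG : ∀ p ∈ l, ∀ c ∈ p.2.toList, c ∈ AL)
    (hkeys : ∀ k ∈ d.keys, k ∈ AL)
    (hnd : d.keys.Nodup) (hc : count = d.keys.length) :
    (∀ x, (l.foldl pvStepA (d, count)).1.get? x = (d.get? x).or (pvFirst x l)) ∧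
    (∀ k ∈ (l.foldl pvStepA (d, count)).1.keys, k ∈ AL) ∧
    (l.foldl pvStepA (d, count)).1.keys.Nodup ∧
    (l.foldl pvStepA (d, count)).2 = ((l.foldl pvStepA (d, count)).1.keys.length : Int) := by
  induction l generalizing d count with
  | nil => exact ⟨fun x => by simp [pvFirst], hkeys, hnd, hc⟩
  | cons p rest ih =>
    by_cases hcnt : count < 3
    · have hstep : pvStepA (d, count) p
          = p.2.toList.foldl (fun q c => if !(q.1.contains c) then (q.1.insert c p.1, q.2 + 1) else q) (d, count) := by
        simp [pvStepA, hcnt]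
      obtain ⟨g1, g2, g3, g4⟩ := pvA_inner p.2.toList d count p.1 hnd hc
      set q := p.2.toList.foldl (fun q c => if !(q.1.contains c) then (q.1.insert c p.1, q.2 + 1) else q) (d, count) with hq
      have hkeys' : ∀ k ∈ q.1.keys, k ∈ AL := by
        intro k hk
        rcases (g2 k).mp hk with h | h
        · exact hkeys k h
        · exact hMPG p (by simp) k h
      have hq2 : q = (q.1, q.2) := rfl
      obtain ⟨i1, i2, i3, i4⟩ := ih q.1 q.2
        (fun r hr => hMPG r (List.mem_cons_of_mem p hr)) hkeys' g3 g4
      rw [List.foldl_cons, hstep, hq2]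
      refine ⟨fun x => ?_, i2, i3, i4⟩
      rw [i1 x, g1 x, pv_first_cons, Option.or_assoc]
      by_cases hx : x ∈ p.2.toList <;> simp [hx]
    · have hstep : pvStepA (d, count) p = (d, count) := by simp [pvStepA, hcnt]
      have hall := pv_all3 d.keys AL hnd hkeys hALle (by omega)
      obtain ⟨i1, i2, i3, i4⟩ := ih d count (fun r hr => hMPG r (List.mem_cons_of_mem p hr)) hkeys hnd hc
      rw [List.foldl_cons, hstep]
      refine ⟨fun x => ?_, i2, i3, i4⟩
      rw [i1 x, pv_first_cons]
      by_cases hx : x ∈ p.2.toList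
      · have hxk : x ∈ d.keys := hall x (hMPG p (by simp) x hx)
        have : (d.get? x).isSome := by
          have := (PySem.Dict.contains_iff_mem_keys d x).mpr hxk
          rw [PySem.Dict.contains_eq_isSome_get?] at this; exact this
        rcases Option.isSome_iff_exists.mp this with ⟨v, hv⟩
        simp [hv, hx]
      · simp [hx]

theorem pv_first_append_single (x : Char) (m : List (Int × String)) (p0 : Int × String) :
    pvFirst x (m ++ [p0]) = (pvFirst x m).or (if x ∈ p0.2.toList then some p0.1 else none) := by
  simp only [pvFirst, List.find?_append, Option.map_or]
  congr 1
  by_cases hx : x ∈ p0.2.toList <;> simp [hx]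

-- A's whole reverse dict loop: exact on every character, except that characters first reached at
-- the final processed pair may be dropped when three keys are already present
theorem pvA_full (AL : List Char) (hALle : AL.length ≤ 3) (m : List (Int × String))
    (p0 : Int × String) (hm : ∀ p ∈ m, ∀ c ∈ p.2.toList, c ∈ AL) :
    (∀ x, ((m ++ [p0]).foldl pvStepA (PySem.Dict.empty, 0)).1.get? x = pvFirst x (m ++ [p0])
        ∨ (((m ++ [p0]).foldl pvStepA (PySem.Dict.empty, 0)).1.get? x = none
            ∧ pvFirst x (m ++ [p0]) = some p0.1)) ∧
    ((m ++ [p0]).foldl pvStepA (PySem.Dict.empty, 0)).1.keys.Nodup := by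
  obtain ⟨a1, _a2, a3, a4⟩ := pvA_inv AL hALle m PySem.Dict.empty 0 hm (by simp) (by simp) (by simp)
  rw [List.foldl_append]
  have hone : [p0].foldl pvStepA (m.foldl pvStepA (PySem.Dict.empty, 0))
      = pvStepA (m.foldl pvStepA (PySem.Dict.empty, 0)) p0 := rfl
  rw [hone]
  set st := m.foldl pvStepA (PySem.Dict.empty, 0) with hst
  have hst2 : st = (st.1, st.2) := rfl
  have ha1 : ∀ x, st.1.get? x = pvFirst x m := by
    intro x; rw [a1 x]; simp
  by_cases hcnt : st.2 < 3
  · have hstep : pvStepA st p0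
        = p0.2.toList.foldl (fun q c => if !(q.1.contains c) then (q.1.insert c p0.1, q.2 + 1) else q) (st.1, st.2) := by
      rw [hst2]; simp [pvStepA, hcnt]
    obtain ⟨g1, _g2, g3, _g4⟩ := pvA_inner p0.2.toList st.1 st.2 p0.1 a3 a4
    refine ⟨fun x => ?_, by rw [hstep]; exact g3⟩
    left
    rw [hstep, g1 x, ha1 x, pv_first_append_single]
  · have hstep : pvStepA st p0 = st := by rw [hst2]; simp [pvStepA, hcnt]
    refine ⟨fun x => ?_, by rw [hstep]; exact a3⟩
    rw [hstep, ha1 x, pv_first_append_single]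
    cases hfm : pvFirst x m with
    | some v => left; simp
    | none =>
      by_cases hx : x ∈ p0.2.toList
      · right; exact ⟨rfl, by simp [hx]⟩
      · left; simp [hx]

-- the spine of A's while loop: advance j to index, accumulating the prefix sum
theorem pv_sweep_eq (travel : List Int) (index : Int) :
    ∀ (n : Nat) (j s : Int), (index - j).toNat = n → 0 ≤ j → j ≤ index → index ≤ (travel.length : Int) →
    s = pvPfx travel j → pvSweep travel index j s = (pvPfx travel index, index) := by
  intro n
  induction n with
  | zero =>
    intro j s hn h0 hji hlen hs
    have : j = index := by omega
    rw [pvSweep, this, hs]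
    simp [this]
  | succ n ih =>
    intro j s hn h0 hji hlen hs
    have hlt : j < index := by omega
    rw [pvSweep]
    simp only [hlt, dif_pos]
    refine ih (j + 1) _ (by omega) (by omega) (by omega) hlen ?_
    rw [hs]
    have hjn : j.toNat < travel.length := by omega
    rw [PySem.List.pyGetD_of_nonneg travel 0 h0]
    unfold pvPfx
    have : (j + 1).toNat = j.toNat + 1 := by omega
    rw [this]
    have h2 : travel[j.toNat]? = some travel[j.toNat] := List.getElem?_eq_getElem hjn
    have h3 : List.take (j.toNat + 1) travel = List.take j.toNat travel ++ [travel[j.toNat]] := by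
      rw [List.take_add_one, h2]; rfl
    rw [h3, List.sum_append, List.getD_eq_getElem?_getD, h2]
    simp

theorem pv_phase2 (travel : List Int) (l : List Int) (res s j : Int)
    (hsorted : l.Pairwise (· ≤ ·)) (hbnd : ∀ v ∈ l, j ≤ v ∧ v ≤ (travel.length : Int))
    (h0 : 0 ≤ j) (hs : s = pvPfx travel j) :
    (l.foldl (fun (q : Int × Int × Int) index =>
        (q.1 + (pvSweep travel index q.2.2 q.2.1).1, (pvSweep travel index q.2.2 q.2.1).1,
         (pvSweep travel index q.2.2 q.2.1).2)) (res, s, j)).1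
      = res + (l.map (pvPfx travel)).sum := by
  induction l generalizing res s j with
  | nil => simp
  | cons v rest ih =>
    have hv := hbnd v (by simp)
    rw [List.foldl_cons]
    simp only
    rw [pv_sweep_eq travel v (v - j).toNat j s rfl h0 hv.1 hv.2 hs]
    rw [ih (res + pvPfx travel v) (pvPfx travel v) v (hsorted.tail)
      (fun w hw => ⟨(List.pairwise_cons.mp hsorted).1 w hw, (hbnd w (by simp [hw])).2⟩)
      (by omega) rfl]
    simp [add_assoc]

-- ===== B-side lemmas =====

-- membership in the suffix character set
theorem pv_mem_pvSuff (garbage : List String) (j : Nat) (c : Char) :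
    c ∈ pvSuff garbage j ↔ ∃ k, j ≤ k ∧ ∃ h : k < garbage.length, c ∈ (garbage[k]).toList := by
  unfold pvSuff
  rw [List.mem_dedup, List.mem_flatMap]
  constructor
  · rintro ⟨s, hs, hc⟩
    rcases List.mem_iff_getElem.mp hs with ⟨i, hi, hsi⟩
    have hlen : i < garbage.length - j := by simpa using hi
    refine ⟨j + i, Nat.le_add_right _ _, by omega, ?_⟩
    have : (garbage.drop j)[i] = garbage[j + i] := List.getElem_drop
    rw [← hsi] at hc
    rw [this] at hc
    exact hc
  · rintro ⟨k, hjk, hk, hc⟩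
    refine ⟨garbage[k], ?_, hc⟩
    have hik : k - j < (garbage.drop j).length := by simp; omega
    refine List.mem_iff_getElem.mpr ⟨k - j, hik, ?_⟩
    have : (garbage.drop j)[k - j] = garbage[j + (k - j)] := List.getElem_drop
    rw [this]
    congr 1
    omega

theorem pv_pvSuff_nodup (garbage : List String) (j : Nat) : (pvSuff garbage j).Nodup :=
  List.nodup_dedup _

-- peeling off house j (any j; beyond the list both sides are empty)
theorem pv_pvSuff_cons (garbage : List String) (j : Nat) (c : Char) :
    c ∈ pvSuff garbage j ↔ c ∈ (garbage.getD j "").toList ∨ c ∈ pvSuff garbage (j + 1) := by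
  rw [pv_mem_pvSuff, pv_mem_pvSuff]
  constructor
  · rintro ⟨k, hjk, hk, hc⟩
    by_cases hkj : k = j
    · left; subst hkj; rwa [List.getD_eq_getElem _ _ hk]
    · right; exact ⟨k, by omega, hk, hc⟩
  · rintro (h | ⟨k, hjk, hk, hc⟩)
    · by_cases hj : j < garbage.length
      · rw [List.getD_eq_getElem _ _ hj] at h
        exact ⟨j, le_refl j, hj, h⟩
      · rw [List.getD_eq_default _ _ (by omega)] at h
        simp at h
    · exact ⟨k, by omega, hk, hc⟩

theorem pv_pvSuff_len (garbage : List String) : pvSuff garbage (garbage.length) = [] := by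
  unfold pvSuff
  simp

-- pvLF: the found index is the LAST house below n containing c
theorem pv_pvLF_some (garbage : List String) (c : Char) :
    ∀ n v, pvLF garbage c n = some v →
      v < n ∧ c ∈ (garbage.getD v "").toList ∧ ∀ k, v < k → k < n → c ∉ (garbage.getD k "").toList := by
  intro n
  induction n with
  | zero => intro v h; simp [pvLF] at h
  | succ n ih =>
    intro v h
    unfold pvLF at h
    by_cases hc : c ∈ (garbage.getD n "").toList
    · rw [if_pos hc] at h
      cases h
      exact ⟨by omega, hc, fun k hk1 hk2 => by omega⟩
    · rw [if_neg hc] at h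
      obtain ⟨h1, h2, h3⟩ := ih v h
      refine ⟨by omega, h2, fun k hk1 hk2 => ?_⟩
      by_cases hkn : k = n
      · subst hkn; exact hc
      · exact h3 k hk1 (by omega)

theorem pv_pvLF_none (garbage : List String) (c : Char) :
    ∀ n, pvLF garbage c n = none → ∀ k < n, c ∉ (garbage.getD k "").toList := by
  intro n
  induction n with
  | zero => intro _ k hk; omega
  | succ n ih =>
    intro h k hk
    unfold pvLF at h
    by_cases hc : c ∈ (garbage.getD n "").toList
    · rw [if_pos hc] at h; cases h
    · rw [if_neg hc] at h
      by_cases hkn : k = n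
      · subst hkn; exact hc
      · exact ih h k (by omega)

-- linking A's pvFirst over the reversed enumeration with pvLF
theorem pv_find_range (garbage : List String) (c : Char) :
    ∀ n : Nat,
      (((List.range n).find? (fun (k : Nat) => decide (c ∈ (PySem.List.pyGetD garbage ((n : Int) - 1 - (k : Int)) "").toList))).map
        (fun k : Nat => (n : Int) - 1 - (k : Int)))
      = (pvLF garbage c n).map (fun (v : Nat) => (v : Int)) := by
  intro n
  induction n with
  | zero => simp [pvLF]
  | succ n ih =>
    rw [List.range_succ_eq_map, List.find?_cons]
    have hidx : ((n + 1 : Nat) : Int) - 1 - ((0 : Nat) : Int) = (n : Int) := by push_cast; omega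
    by_cases hc : c ∈ (garbage.getD n "").toList
    · have hp : (decide (c ∈ (PySem.List.pyGetD garbage (((n + 1 : Nat) : Int) - 1 - ((0 : Nat) : Int)) "").toList)) = true := by
        rw [hidx, PySem.List.pyGetD_natCast]
        simpa using hc
      rw [hp]
      have hLF : pvLF garbage c (n + 1) = some n := by
        show (if c ∈ (garbage.getD n "").toList then some n else pvLF garbage c n) = some n
        rw [if_pos hc]
      rw [hLF]
      simp
    · have hp : (decide (c ∈ (PySem.List.pyGetD garbage (((n + 1 : Nat) : Int) - 1 - ((0 : Nat) : Int)) "").toList)) = false := by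
        rw [hidx, PySem.List.pyGetD_natCast]
        simpa using hc
      rw [hp]
      have hLF : pvLF garbage c (n + 1) = pvLF garbage c n := by
        show (if c ∈ (garbage.getD n "").toList then some n else pvLF garbage c n) = pvLF garbage c n
        rw [if_neg hc]
      rw [hLF, List.find?_map]
      have hpred : ((fun (k : Nat) => decide (c ∈ (PySem.List.pyGetD garbage (((n + 1 : Nat) : Int) - 1 - (k : Int)) "").toList)) ∘ Nat.succ)
          = (fun (k : Nat) => decide (c ∈ (PySem.List.pyGetD garbage ((n : Int) - 1 - (k : Int)) "").toList)) := by
        funext k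
        have h : ((n + 1 : Nat) : Int) - 1 - ((k + 1 : Nat) : Int) = (n : Int) - 1 - (k : Int) := by
          push_cast
          omega
        simp only [Function.comp, Nat.succ_eq_add_one]
        rw [h]
      rw [hpred, Option.map_map]
      have hmapf : ((fun (k : Nat) => ((n + 1 : Nat) : Int) - 1 - (k : Int)) ∘ Nat.succ)
          = (fun (k : Nat) => (n : Int) - 1 - (k : Int)) := by
        funext k
        simp only [Function.comp, Nat.succ_eq_add_one]
        push_cast
        omega
      rw [hmapf, ih]

theorem pv_first_eq_pvLF (garbage : List String) (c : Char) :
    pvFirst c (PySem.List.enumerate garbage).reverse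
      = (pvLF garbage c garbage.length).map (fun (v : Nat) => (v : Int)) := by
  rw [pv_enum_rev]
  unfold pvFirst
  rw [List.find?_map, Option.map_map]
  have hfst : (Prod.fst ∘ fun j : Int => (j, PySem.List.pyGetD garbage j "")) = id := by
    funext j; rfl
  rw [hfst, Option.map_id]
  have hrange : PySem.List.pyRange ((garbage.length : Int) - 1) (-1) (-1)
      = (List.range garbage.length).map (fun k : Nat => ((garbage.length : Int)) - 1 - (k : Int)) := by
    rw [PySem.List.pyRange_neg_one]
    have : ((garbage.length : Int) - 1 - (-1)).toNat = garbage.length := by omega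
    rw [this]
  rw [hrange, List.find?_map]
  have := pv_find_range garbage c garbage.length
  rw [← this]
  congr 1

-- c occurs somewhere iff pvLF finds an index; tie to pvSuff
theorem pv_pvLF_suff (garbage : List String) (c : Char) (v : Nat)
    (h : pvLF garbage c garbage.length = some v) (j : Nat) :
    c ∈ pvSuff garbage j ↔ j ≤ v := by
  obtain ⟨h1, h2, h3⟩ := pv_pvLF_some garbage c garbage.length v h
  rw [pv_mem_pvSuff]
  constructor
  · rintro ⟨k, hjk, hk, hc⟩
    by_contra hvj
    have hvk : v < k ∨ k ≤ v := by omega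
    rcases hvk with hvk | hvk
    · exact h3 k hvk hk (by rwa [List.getD_eq_getElem _ _ hk])
    · omega
  · intro hjv
    rw [List.getD_eq_getElem _ _ h1] at h2
    exact ⟨v, hjv, h1, h2⟩

theorem pv_pvLF_none_suff (garbage : List String) (c : Char)
    (h : pvLF garbage c garbage.length = none) (j : Nat) : c ∉ pvSuff garbage j := by
  rw [pv_mem_pvSuff]
  rintro ⟨k, hjk, hk, hc⟩
  exact pv_pvLF_none garbage c garbage.length h k hk (by rwa [List.getD_eq_getElem _ _ hk])

-- take-sum as a range sum
theorem pv_take_sum (l : List Int) :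
    ∀ v : Nat, v ≤ l.length → (l.take v).sum = ∑ t ∈ Finset.range v, l.getD t 0 := by
  intro v
  induction v with
  | zero => simp
  | succ v ih =>
    intro hv
    rw [Finset.sum_range_succ, ← ih (by omega)]
    have hvl : v < l.length := by omega
    have h2 : l[v]? = some l[v] := List.getElem?_eq_getElem hvl
    have h3 : List.take (v + 1) l = List.take v l ++ [l[v]] := by
      rw [List.take_add_one, h2]; rfl
    rw [h3, List.sum_append, List.getD_eq_getElem?_getD, h2]
    simp

theorem pv_ite_sum (l : List Int) (v N : Nat) (hvN : v ≤ N) :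
    ∑ t ∈ Finset.range N, (if t < v then l.getD t 0 else 0) = ∑ t ∈ Finset.range v, l.getD t 0 := by
  have hsub : Finset.range v ⊆ Finset.range N := by
    intro x hx
    simp only [Finset.mem_range] at hx ⊢
    omega
  have h1 : ∑ t ∈ Finset.range v, (if t < v then l.getD t 0 else 0)
      = ∑ t ∈ Finset.range N, (if t < v then l.getD t 0 else 0) := by
    refine Finset.sum_subset hsub (fun x _ hx => ?_)
    simp only [Finset.mem_range] at hx
    exact if_neg (by omega)
  rw [← h1]
  exact Finset.sum_congr rfl (fun t ht => if_pos (Finset.mem_range.mp ht))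

-- B's loop: each road t < j is charged travel[t] once per distinct type at house t+1 or beyond
theorem pvB_loop (garbage : List String) (travel : List Int) :
    ∀ (j : Nat) (acc : Int) (seen : PySem.Set Char),
      seen.Nodup → (∀ c, c ∈ seen ↔ c ∈ pvSuff garbage (j + 1)) →
      ((PySem.List.pyRange (j : Int) 0 (-1)).foldl (pvStepB garbage travel) (acc, seen)).1
        = acc + ∑ t ∈ Finset.range j,
            PySem.List.pyGetD travel (t : Int) 0 * ((pvSuff garbage (t + 1)).length : Int) := by
  intro j
  induction j with
  | zero =>
    intro acc seen _ _
    rw [PySem.List.pyRange_neg_one_eq_nil (by norm_num)]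
    simp
  | succ j ih =>
    intro acc seen hnd hmem
    rw [PySem.List.pyRange_neg_one_cons (by push_cast; omega)]
    rw [List.foldl_cons]
    have hg : PySem.List.pyGetD garbage ((j + 1 : Nat) : Int) "" = garbage.getD (j + 1) "" := by
      rw [PySem.List.pyGetD_natCast]
    have htl : ((j + 1 : Nat) : Int) - 1 = (j : Int) := by push_cast; omega
    rw [htl]
    by_cases hcond : (garbage.getD (j + 1) "").toList ≠ [] ∨ seen ≠ []
    · have hmem' : ∀ c, c ∈ PySem.Set.update seen (garbage.getD (j + 1) "").toList ↔ c ∈ pvSuff garbage (j + 1) := by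
        intro c
        rw [PySem.Set.mem_update, hmem c, pv_pvSuff_cons garbage (j + 1) c]
        tauto
      have hnd' : (PySem.Set.update seen (garbage.getD (j + 1) "").toList).Nodup :=
        PySem.Set.nodup_update seen _ hnd
      have hperm : (PySem.Set.update seen (garbage.getD (j + 1) "").toList).length = (pvSuff garbage (j + 1)).length :=
        ((List.perm_ext_iff_of_nodup hnd' (pv_pvSuff_nodup garbage (j + 1))).mpr hmem').length_eq
      have hstep : pvStepB garbage travel (acc, seen) ((j + 1 : Nat) : Int)
          = (acc + PySem.List.pyGetD travel (j : Int) 0 * PySem.Set.len (PySem.Set.update seen (garbage.getD (j + 1) "").toList),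
             PySem.Set.update seen (garbage.getD (j + 1) "").toList) := by
        unfold pvStepB
        simp only [hg, htl]
        rw [if_pos hcond]
      rw [hstep, ih _ _ hnd' hmem']
      have hlen : PySem.Set.len (PySem.Set.update seen (garbage.getD (j + 1) "").toList)
          = ((pvSuff garbage (j + 1)).length : Int) := by
        rw [PySem.Set.len_eq, hperm]
      rw [hlen, Finset.sum_range_succ]
      ring
    · have hge : (garbage.getD (j + 1) "").toList = [] := by
        by_contra h; exact hcond (Or.inl h)
      have hse : seen = [] := by
        by_contra h; exact hcond (Or.inr h)
      have hempt : pvSuff garbage (j + 1) = [] := by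
        apply List.eq_nil_iff_forall_not_mem.mpr
        intro c hc
        rcases (pv_pvSuff_cons garbage (j + 1) c).mp hc with h | h
        · rw [hge] at h; simp at h
        · have := (hmem c).mpr h
          rw [hse] at this; simp at this
      have hmemj : ∀ c, c ∈ seen ↔ c ∈ pvSuff garbage (j + 1) := by
        intro c
        rw [hse, hempt]
      have hstep : pvStepB garbage travel (acc, seen) ((j + 1 : Nat) : Int) = (acc, seen) := by
        unfold pvStepB
        simp only [hg]
        rw [if_neg hcond]
      rw [hstep, ih acc seen hnd hmemj]
      rw [Finset.sum_range_succ, hempt]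
      simp

-- B's port, with its loop body named
theorem pvB_eq (garbage : List String) (travel : List Int) :
    garbageCollection_best_speed_alt garbage travel
      = ((PySem.List.pyRange ((garbage.length : Int) - 1) 0 (-1)).foldl (pvStepB garbage travel)
          (garbage.foldl (fun r g => r + PySem.Str.len g) 0, (PySem.Set.empty : PySem.Set Char))).1 := rfl

-- ===== VERDICT (by name: the statement is the Claim_ definition above) =====
theorem garbageCollection_best_speed_spec : Claim_equal_garbageCollection_best_speed := by
  intro garbage travel _hdom hpre
  obtain ⟨hPREb, hreach⟩ := hpre
  unfold Spec_garbageCollection_best_speed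
  rw [pvB_eq]
  unfold garbageCollection_best_speed
  simp only [pvA_phase1]
  cases garbage with
  | nil =>
    rw [PySem.List.pyRange_neg_one_eq_nil (by norm_num)]
    simp [PySem.List.enumerate]
    rfl
  | cons g0 grest =>
  set AL := (grest.flatMap (fun s => s.toList)).dedup with hALdef
  have hALle : AL.length ≤ 3 := by
    rcases hPREb with hb | hb
    · have hsub : AL ⊆ ['M', 'P', 'G'] := by
        intro c hcAL
        rcases List.mem_flatMap.mp (List.mem_dedup.mp hcAL) with ⟨s, hs, hc⟩
        have h1 := List.all_eq_true.mp hb s (List.mem_cons_of_mem g0 hs)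
        have h2 := List.all_eq_true.mp h1 c hc
        simp at h2
        rcases h2 with (h | h) | h <;> simp [h]
      have hnd : AL.Nodup := List.nodup_dedup _
      have := List.toFinset_card_of_nodup hnd
      have hcard : AL.toFinset.card ≤ (['M', 'P', 'G'] : List Char).toFinset.card :=
        Finset.card_le_card (fun c hc => List.mem_toFinset.mpr (hsub (List.mem_toFinset.mp hc)))
      have h3 : (['M', 'P', 'G'] : List Char).toFinset.card = 3 := by decide
      omega
    · simpa using hb
  -- the reversed enumeration splits off the final (index 0) pair
  have hrev : (PySem.List.enumerate (g0 :: grest)).reverse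
      = (PySem.List.enumerate grest 1).reverse ++ [((0 : Int), g0)] := by
    rw [PySem.List.enumerate_cons]
    norm_num
  have hmt : ∀ p ∈ (PySem.List.enumerate grest 1).reverse, ∀ c ∈ p.2.toList, c ∈ AL := by
    intro p hp c hc
    rcases (PySem.List.mem_enumerate_iff grest 1 p).mp (List.mem_reverse.mp hp) with ⟨k, hk, rfl⟩
    exact List.mem_dedup.mpr (List.mem_flatMap.mpr ⟨grest[k], List.getElem_mem hk, hc⟩)
  have hfirstE : ∀ x, pvFirst x ((PySem.List.enumerate grest 1).reverse ++ [((0 : Int), g0)])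
      = (pvLF (g0 :: grest) x (g0 :: grest).length).map (fun (v : Nat) => (v : Int)) := by
    intro x
    rw [← hrev]
    exact pv_first_eq_pvLF (g0 :: grest) x
  rw [hrev]
  obtain ⟨a1, a3⟩ := pvA_full AL hALle (PySem.List.enumerate grest 1).reverse ((0 : Int), g0) hmt
  set E := (PySem.List.enumerate grest 1).reverse ++ [((0 : Int), g0)] with hE
  set dA := (List.foldl pvStepA (PySem.Dict.empty, 0) E).1 with hdA
  set K := pvSuff (g0 :: grest) 0 with hK
  have hKnd : K.Nodup := pv_pvSuff_nodup _ 0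
  have hmemkeys : ∀ (d : PySem.Dict Char Int) (k : Char), k ∈ d.keys ↔ ¬ d.get? k = none := by
    intro d k
    rw [PySem.Dict.get?_eq_none_iff_not_mem_keys]
    tauto
  -- dict lookups of keys are last-occurrence indices
  have hgetK : ∀ k ∈ dA.keys, dA.get? k
      = (pvLF (g0 :: grest) k (g0 :: grest).length).map (fun (v : Nat) => (v : Int)) := by
    intro k hk
    rcases a1 k with h | ⟨h2, _⟩
    · rw [h, hfirstE k]
    · exact absurd h2 ((hmemkeys dA k).mp hk)
  -- every key occurs somewhere, with a bounded, travel-reachable last index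
  have hkeyv : ∀ k ∈ dA.keys, ∃ v : Nat, pvLF (g0 :: grest) k (g0 :: grest).length = some v := by
    intro k hk
    cases hLF : pvLF (g0 :: grest) k (g0 :: grest).length with
    | none =>
      have := hgetK k hk
      rw [hLF] at this
      exact absurd this ((hmemkeys dA k).mp hk)
    | some v => exact ⟨v, rfl⟩
  have hVfacts : ∀ (c : Char) (v : Nat), pvLF (g0 :: grest) c (g0 :: grest).length = some v →
      v < (g0 :: grest).length ∧ c ∈ K ∧ (v : Int) ≤ (travel.length : Int) := by
    intro c v hv
    obtain ⟨h1, h2, _⟩ := pv_pvLF_some (g0 :: grest) c (g0 :: grest).length v hv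
    rw [List.getD_eq_getElem _ _ h1] at h2
    have hcK : c ∈ K := by
      rw [hK, pv_mem_pvSuff]
      exact ⟨v, Nat.zero_le v, h1, h2⟩
    have hp : ((v : Int), (g0 :: grest)[v]) ∈ PySem.List.enumerate (g0 :: grest) := by
      apply (PySem.List.mem_enumerate_iff (g0 :: grest) 0 _).mpr
      exact ⟨v, h1, by simp⟩
    have hne : ((g0 :: grest)[v]).toList ≠ [] := by
      intro h
      rw [h] at h2
      simp at h2
    exact ⟨h1, hcK, hreach _ hp hne⟩
  -- the value stored per key
  have hvalsA : dA.values = dA.keys.map (fun k => (dA.get? k).getD 0) := by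
    rw [PySem.Dict.values_eq_map_keys dA a3 0]
    exact List.map_congr_left (fun k hk => PySem.Dict.getD_eq_get?_getD dA k 0)
  -- bounds on every stored index (for A's phase-2 sweep)
  have hbndA : ∀ w ∈ dA.values, 0 ≤ w ∧ w ≤ (travel.length : Int) := by
    intro w hw
    rw [hvalsA] at hw
    rcases List.mem_map.mp hw with ⟨k, hk, hkw⟩
    obtain ⟨v, hv⟩ := hkeyv k hk
    rw [hgetK k hk, hv] at hkw
    obtain ⟨_, _, hvt⟩ := hVfacts k v hv
    simp only [Option.map_some, Option.getD_some] at hkw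
    constructor
    · omega
    · rw [← hkw]; exact hvt
  -- A's phase 2 (sorted sweep) is the prefix-sum total over dA.values
  have hsp : (PySem.List.sorted dA.values (fun v => v)).Perm dA.values :=
    PySem.List.sorted_perm dA.values (fun v => v) false
  have hpair : (PySem.List.sorted dA.values (fun v => v)).Pairwise (· ≤ ·) := by
    simpa using PySem.List.sorted_pairwise dA.values (fun v => v)
  rw [pv_phase2 travel (PySem.List.sorted dA.values (fun v => v)) _ 0 0 hpair
    (fun w hw => ⟨(hbndA w (hsp.mem_iff.mp hw)).1, (hbndA w (hsp.mem_iff.mp hw)).2⟩)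
    (le_refl 0) (by simp [pvPfx])]
  -- the per-character prefix-sum value
  have hmapF : (dA.values.map (pvPfx travel)) = dA.keys.map (pvF (g0 :: grest) travel) := by
    rw [hvalsA, List.map_map]
    refine List.map_congr_left (fun k hk => ?_)
    simp only [Function.comp]
    unfold pvF
    rw [hgetK k hk]
  -- keys lie in K, and K's extra characters contribute 0
  have hsubK : ∀ k ∈ dA.keys, k ∈ K := by
    intro k hk
    obtain ⟨v, hv⟩ := hkeyv k hk
    exact (hVfacts k v hv).2.1
  have hextra : ∀ c ∈ K, c ∉ dA.keys → pvF (g0 :: grest) travel c = 0 := by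
    intro c hcK hckeys
    have hnone : dA.get? c = none := by
      by_contra h
      exact hckeys ((hmemkeys dA c).mpr h)
    cases hLF : pvLF (g0 :: grest) c (g0 :: grest).length with
    | none =>
      exact absurd (by rw [hK] at hcK; exact hcK) (pv_pvLF_none_suff (g0 :: grest) c hLF 0)
    | some v =>
      have hv0 : v = 0 := by
        rcases a1 c with h | ⟨_, h2⟩
        · rw [hnone, hfirstE c, hLF] at h
          simp at h
        · rw [hfirstE c, hLF] at h2
          simp at h2
          omega
      unfold pvF
      simp only [hLF, hv0, Option.map_some, Option.getD_some]
      simp [pvPfx]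
  -- sum over keys = sum over all characters K
  have hsums : (dA.keys.map (pvF (g0 :: grest) travel)).sum = (K.map (pvF (g0 :: grest) travel)).sum := by
    have hpart := List.filter_append_perm (fun k => decide (k ∈ dA.keys)) K
    have hkeep : (K.filter (fun k => decide (k ∈ dA.keys))).Perm dA.keys := by
      rw [List.perm_ext_iff_of_nodup (hKnd.filter _) a3]
      intro k
      simp only [List.mem_filter, decide_eq_true_eq]
      exact ⟨fun h => h.2, fun h => ⟨hsubK k h, h⟩⟩
    have hzero : ∀ y ∈ (K.filter (fun k => !decide (k ∈ dA.keys))).map (pvF (g0 :: grest) travel), y = 0 := by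
      intro y hy
      rcases List.mem_map.mp hy with ⟨k, hk, hky⟩
      rcases List.mem_filter.mp hk with ⟨hkK, hknA⟩
      rw [← hky]
      exact hextra k hkK (by simpa using hknA)
    calc (dA.keys.map (pvF (g0 :: grest) travel)).sum
        = ((K.filter (fun k => decide (k ∈ dA.keys))).map (pvF (g0 :: grest) travel)).sum := ((hkeep.map (pvF (g0 :: grest) travel)).sum_eq).symm
      _ = ((K.filter (fun k => decide (k ∈ dA.keys))).map (pvF (g0 :: grest) travel)).sum
          + ((K.filter (fun k => !decide (k ∈ dA.keys))).map (pvF (g0 :: grest) travel)).sum := by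
            rw [List.sum_eq_zero hzero]; ring
      _ = (((K.filter (fun k => decide (k ∈ dA.keys)))
            ++ (K.filter (fun k => !decide (k ∈ dA.keys)))).map (pvF (g0 :: grest) travel)).sum := by
            rw [List.map_append, List.sum_append]
      _ = (K.map (pvF (g0 :: grest) travel)).sum := (hpart.map (pvF (g0 :: grest) travel)).sum_eq
  -- the exchange of summation: per-character prefix sums = per-road charges
  have hsumK : (K.map (pvF (g0 :: grest) travel)).sum
      = ∑ t ∈ Finset.range grest.length,
          PySem.List.pyGetD travel (t : Int) 0 * ((pvSuff (g0 :: grest) (t + 1)).length : Int) := by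
    have hFc : ∀ c ∈ K.toFinset, pvF (g0 :: grest) travel c
        = ∑ t ∈ Finset.range grest.length,
            (if t < (pvLF (g0 :: grest) c (g0 :: grest).length).getD 0 then travel.getD t 0 else 0) := by
      intro c hc
      have hcK : c ∈ K := List.mem_toFinset.mp hc
      cases hLF : pvLF (g0 :: grest) c (g0 :: grest).length with
      | none =>
        exact absurd (by rw [hK] at hcK; exact hcK) (pv_pvLF_none_suff (g0 :: grest) c hLF 0)
      | some v =>
        obtain ⟨hvn, _, hvt⟩ := hVfacts c v hLF
        have hvt' : v ≤ travel.length := by exact_mod_cast hvt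
        have hvn' : v ≤ grest.length := by
          simp only [List.length_cons] at hvn
          omega
        unfold pvF
        simp only [hLF, Option.map_some, Option.getD_some]
        have h1 : pvPfx travel ((v : Nat) : Int) = (travel.take v).sum := rfl
        rw [h1, pv_take_sum travel v hvt', ← pv_ite_sum travel v grest.length hvn']
        rfl
    rw [← List.sum_toFinset (pvF (g0 :: grest) travel) hKnd, Finset.sum_congr rfl hFc, Finset.sum_comm]
    refine Finset.sum_congr rfl (fun t _ => ?_)
    have hfilter : K.toFinset.filter
          (fun c => t < (pvLF (g0 :: grest) c (g0 :: grest).length).getD 0)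
        = (pvSuff (g0 :: grest) (t + 1)).toFinset := by
      ext c
      simp only [Finset.mem_filter, List.mem_toFinset]
      constructor
      · rintro ⟨hcK, hlt⟩
        cases hLF : pvLF (g0 :: grest) c (g0 :: grest).length with
        | none =>
          exact absurd (by rw [hK] at hcK; exact hcK) (pv_pvLF_none_suff (g0 :: grest) c hLF 0)
        | some v =>
          rw [hLF] at hlt
          simp only [Option.getD_some] at hlt
          exact (pv_pvLF_suff (g0 :: grest) c v hLF (t + 1)).mpr (by omega)
      · intro hcS
        cases hLF : pvLF (g0 :: grest) c (g0 :: grest).length with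
        | none => exact absurd hcS (pv_pvLF_none_suff (g0 :: grest) c hLF (t + 1))
        | some v =>
          have hv := (pv_pvLF_suff (g0 :: grest) c v hLF (t + 1)).mp hcS
          have hcK : c ∈ K := (pv_pvLF_suff (g0 :: grest) c v hLF 0).mpr (Nat.zero_le v)
          refine ⟨hcK, ?_⟩
          simp only [Option.getD_some]
          omega
    calc (∑ c ∈ K.toFinset,
            if t < (pvLF (g0 :: grest) c (g0 :: grest).length).getD 0 then travel.getD t 0 else 0)
        = ∑ c ∈ K.toFinset.filter
            (fun c => t < (pvLF (g0 :: grest) c (g0 :: grest).length).getD 0), travel.getD t 0 :=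
          (Finset.sum_filter _ _).symm
      _ = ((pvSuff (g0 :: grest) (t + 1)).length : Int) * travel.getD t 0 := by
          rw [Finset.sum_const, hfilter, List.toFinset_card_of_nodup (pv_pvSuff_nodup _ _)]
          simp
      _ = PySem.List.pyGetD travel (t : Int) 0 * ((pvSuff (g0 :: grest) (t + 1)).length : Int) := by
          rw [PySem.List.pyGetD_natCast]
          ring
  -- B's fold
  have hcast : (((g0 :: grest).length : Int) - 1) = ((grest.length : Nat) : Int) := by
    simp only [List.length_cons]
    push_cast
    omega
  rw [hcast, pvB_loop (g0 :: grest) travel grest.length _ (PySem.Set.empty : PySem.Set Char)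
    List.nodup_nil
    (fun c => by
      constructor
      · intro h
        simp [PySem.Set.empty] at h
      · intro h
        have hn : pvSuff (g0 :: grest) (grest.length + 1) = [] := pv_pvSuff_len (g0 :: grest)
        rw [hn] at h
        simp at h)]
  -- the two totals of string lengths agree
  have hlens : (((PySem.List.enumerate grest 1).reverse ++ [((0 : Int), g0)]).map
        (fun p => PySem.Str.len p.2)).sum
      = (g0 :: grest).foldl (fun r g => r + PySem.Str.len g) 0 := by
    rw [pv_foldl_add]
    rw [List.map_append, List.sum_append, List.map_reverse, List.sum_reverse]
    have h2 : (List.map (fun p : Int × String => PySem.Str.len p.2) (PySem.List.enumerate grest 1))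
        = List.map PySem.Str.len grest := by
      rw [show (fun p : Int × String => PySem.Str.len p.2) = (PySem.Str.len ∘ Prod.snd) from rfl,
          ← List.map_map, PySem.List.map_snd_enumerate]
    rw [h2]
    simp [add_comm]
  rw [hE, hlens]
  rw [(hsp.map (pvPfx travel)).sum_eq, hmapF, hsums, hsumK]
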